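-- pv_equiv track=rewrite | github.com/MuhammadK8/cs412DynamicProgrammingII | RocketSectionsIterative.py | blocks_solver
-- ===== SOURCE A (Python) =====
-- from math import gcd
-- from functools import reduce
--
-- def blocks_solver(blocks, total_target):
--     factor = reduce(gcd, blocks)
--     new_target, remainder = divmod(total_target, factor)
--     if remainder:
--         raise ValueError("Cannot make the target with the given blocks")
--     blocks = [block // factor for block in blocks]
--
--     # Dynamic programming phase
--     memo = [(0, None)] + [None] * new_target
--     for target in range(1, new_target + 1):
--         min_ans = float('inf')
--         min_idx = None
--         for idx in range(len(blocks) - 1, -1, -1):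
--             next_target = target - blocks[idx]
--             if next_target < 0:
--                 continue
--             ans, _ = memo[next_target]
--             if ans < min_ans:
--                 min_ans = ans
--                 min_idx = idx
--
--         ret = (min_ans + 1, min_idx)
--         memo[target] = ret
--
--     total_blocks, next_block = memo[new_target]
--     if total_blocks == float("inf"):
--         raise ValueError("Cannot make the target with the given blocks")
--
--     # Solution building phase
--     counts = [0] * len(blocks)
--     remaining_target = new_target
--     while next_block is not None:
--         remaining_target -= blocks[next_block]
--         counts[next_block] += 1
--         _, next_block = memo[remaining_target]
--
--     return total_blocks, counts
-- ===== SOURCE B (Python) =====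
-- from math import gcd
-- from functools import reduce
--
-- def blocks_solver(blocks, total_target):
--     factor = reduce(gcd, blocks)
--     new_target, remainder = divmod(total_target, factor)
--     if remainder:
--         raise ValueError("Cannot make the target with the given blocks")
--     blocks = [block // factor for block in blocks]
--
--     # Breadth-first search from 0 along edges t -> t + b:
--     # dist[t] = BFS level = least number of blocks summing to t (None = unreachable).
--     dist = [0] + [None] * new_target
--     frontier = [0]
--     level = 0
--     while frontier:
--         level += 1
--         nxt = []
--         for t in frontier:
--             for b in blocks:
--                 nt = t + b
--                 if 0 <= nt <= new_target and dist[nt] is None: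
--                     dist[nt] = level
--                     nxt.append(nt)
--         frontier = nxt
--
--     total_blocks = dist[new_target]
--     if total_blocks is None:
--         raise ValueError("Cannot make the target with the given blocks")
--
--     # Backtracking from the distance table: at each t take the highest index whose
--     # block steps down one BFS level (no stored backpointers).
--     counts = [0] * len(blocks)
--     t = new_target
--     while t > 0:
--         for idx in range(len(blocks) - 1, -1, -1):
--             b = blocks[idx]
--             if b <= t and dist[t - b] == dist[t] - 1:
--                 counts[idx] += 1
--                 t -= b
--                 break
--     return total_blocks, counts
-- ===== Notes on version B (the rewrite author's own statement) =====
-- stated objective: alternative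
-- what changed: B replaces A's backward DP table fill (min over predecessors per target, with stored backpointers) by a forward breadth-first search from 0 along edges t -> t+b whose level number is the block count, and re-derives each chosen block from the distance table during backtracking instead of following stored pointers.
-- outside the precondition, e.g. on blocks_solver([-1], -1): A returns (1, [1]), B returns (1, [1])
import Mathlib
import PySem

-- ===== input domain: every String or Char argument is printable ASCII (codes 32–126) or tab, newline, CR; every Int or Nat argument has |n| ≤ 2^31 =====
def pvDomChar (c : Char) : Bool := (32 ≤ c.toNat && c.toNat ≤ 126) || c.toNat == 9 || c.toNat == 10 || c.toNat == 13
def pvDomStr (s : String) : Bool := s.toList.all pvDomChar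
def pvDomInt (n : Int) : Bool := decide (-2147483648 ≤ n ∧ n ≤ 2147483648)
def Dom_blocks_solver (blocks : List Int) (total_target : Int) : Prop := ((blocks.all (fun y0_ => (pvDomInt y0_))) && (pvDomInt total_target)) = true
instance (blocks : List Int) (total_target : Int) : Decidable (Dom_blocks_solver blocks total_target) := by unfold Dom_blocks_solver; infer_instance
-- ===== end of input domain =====

-- B replaces A's backward DP table fill (min over predecessors, stored backpointers) by a
-- forward breadth-first search from 0 whose level number is the block count, and re-derives
-- the chosen blocks from the distance table (objective: alternative algorithm, same cost).

-- ===== PORT A =====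
-- shared preprocessing helpers (these Python lines are verbatim identical in Source A and Source B)
-- factor = reduce(gcd, blocks)  (reduce on [h] returns h without calling gcd)
def pvGcdFold (h : Int) (t : List Int) : Int :=
  t.foldl (fun a b => (Int.gcd a b : Int)) h

-- counts[idx] += 1 (Python list assignment; every call site passes a valid non-negative index)
def pvIncr (xs : List Int) (i : Int) : List Int :=
  PySem.List.pySetD xs i (PySem.List.pyGetD xs i 0 + 1)

-- A's inner loop: for idx in range(len(blocks)-1, -1, -1) with strict '<'
-- (min count none = float('inf'); a placeholder cell reads as `some none` = Python None)
def pvAInner (bl : List Int) (memo : List (Option (Option Int × Option Int))) (target : Int) :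
    Option Int × Option Int :=
  (PySem.List.pyRange ((bl.length : Int) - 1) (-1) (-1)).foldl
    (fun st idx =>
      match PySem.List.pyGet? bl idx with
      | none => st
      | some b =>
        if target - b < 0 then st
        else
          match PySem.List.pyGet? memo (target - b) with
          | none => st        -- IndexError in Python (only outside Pre_)
          | some none => st   -- TypeError unpacking the None placeholder (only outside Pre_)
          | some (some (ans, _)) =>
            match ans, st.1 with
            | none, _ => st                        -- ans = inf never beats min_ans (inf < inf is False)
            | some a, none => (some a, some idx)   -- any finite ans beats the initial inf
            | some a, some m => if a < m then (some a, some idx) else st)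
    (none, none)

-- the forward fill: memo[target] = (min_ans + 1, min_idx)   (inf + 1 = inf, i.e. none stays none)
def pvAFill (bl : List Int) (memo0 : List (Option (Option Int × Option Int))) (ts : List Int) :
    List (Option (Option Int × Option Int)) :=
  ts.foldl (fun memo target =>
    let r := pvAInner bl memo target
    PySem.List.pySetD memo target (some (r.1.map (· + 1), r.2))) memo0

-- while next_block is not None: ... (fuel new_target+1 bounds the loop: under Pre_ every
-- step lowers remaining_target by at least 1 and the walk stops at 0, so fuel never runs out)
def pvARecon (memo : List (Option (Option Int × Option Int))) (bl : List Int) :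
    Nat → Int → Option Int → List Int → List Int
  | 0, _, _, counts => counts
  | fuel + 1, remaining, nb?, counts =>
    match nb? with
    | none => counts
    | some nb =>
      match PySem.List.pyGet? bl nb with
      | none => counts    -- IndexError (never happens: nb is a stored valid index)
      | some b =>
        let counts' := pvIncr counts nb
        match PySem.List.pyGet? memo (remaining - b) with
        | none => counts'         -- IndexError (only outside Pre_)
        | some none => counts'    -- TypeError (only outside Pre_)
        | some (some (_, nb')) => pvARecon memo bl fuel (remaining - b) nb' counts'

def blocks_solver (blocks : List Int) (total_target : Int) : Int × List Int :=
  match blocks with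
  | [] => (0, [])       -- reduce() on an empty list: TypeError (outside Pre_)
  | h :: tl =>
    let factor := pvGcdFold h tl
    match PySem.Int.divmod? total_target factor with
    | none => (0, [])   -- ZeroDivisionError (outside Pre_)
    | some (new_target, remainder) =>
      if remainder ≠ 0 then (0, [])   -- raise ValueError (outside Pre_)
      else
        let bl := (h :: tl).map (fun b => PySem.Int.floordiv b factor)
        let memo := pvAFill bl
          (some (some 0, none) :: List.replicate new_target.toNat none)
          (PySem.List.pyRange 1 (new_target + 1) 1)
        match PySem.List.pyGet? memo new_target with
        | none => (0, [])        -- IndexError: new_target ≤ -2 (outside Pre_)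
        | some none => (0, [])   -- TypeError (outside Pre_)
        | some (some (none, _)) => (0, [])   -- total_blocks == inf: raise ValueError (outside Pre_)
        | some (some (some total, nb)) =>
          (total, pvARecon memo bl (new_target.toNat + 1) new_target nb
                    (List.replicate bl.length 0))

-- ===== PORT B =====
-- one edge relaxation of the BFS: nt = t + b; if 0 <= nt <= new_target and dist[nt] is None:
-- dist[nt] = level; nxt.append(nt)
def pvBStep (T lvl : Int) (st : List (Option Int) × List Int) (nt : Int) :
    List (Option Int) × List Int :=
  if 0 ≤ nt ∧ nt ≤ T then
    match PySem.List.pyGet? st.1 nt with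
    | some none => (PySem.List.pySetD st.1 nt (some lvl), st.2 ++ [nt])
    | _ => st
  else st

-- for b in blocks: one source t expanded along every block
def pvBExpandT (bl : List Int) (T lvl : Int) (st : List (Option Int) × List Int) (t : Int) :
    List (Option Int) × List Int :=
  bl.foldl (fun s b => pvBStep T lvl s (t + b)) st

-- while frontier: level += 1; expand every frontier node; frontier = nxt
-- (fuel new_target.toNat+2 bounds the loop: under Pre_ the levels never exceed new_target,
-- so the frontier empties before the fuel runs out)
def pvBfs (bl : List Int) (T : Int) :
    Nat → Int → List (Option Int) → List Int → List (Option Int)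
  | 0, _, dist, _ => dist
  | fuel + 1, lvl, dist, frontier =>
    if frontier.isEmpty then dist
    else
      let st := frontier.foldl (pvBExpandT bl T (lvl + 1)) (dist, [])
      pvBfs bl T fuel (lvl + 1) st.1 st.2

-- while t > 0: scan idx from high to low for the first block one BFS level down, take it
-- (fuel new_target bounds the loop: under Pre_ t drops by at least 1 per step)
def pvBRecon (dp : List (Option Int)) (bl : List Int) : Nat → Int → List Int → List Int
  | 0, _, counts => counts
  | fuel + 1, t, counts =>
    if t ≤ 0 then counts
    else
      match PySem.List.pyGet? dp t with
      | some (some c) =>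
        match (PySem.List.pyRange ((bl.length : Int) - 1) (-1) (-1)).find? (fun idx =>
            match PySem.List.pyGet? bl idx with
            | some b => decide (b ≤ t) && (PySem.List.pyGet? dp (t - b) == some (some (c - 1)))
            | none => false) with
        | some idx =>
          match PySem.List.pyGet? bl idx with
          | some b => pvBRecon dp bl fuel (t - b) (pvIncr counts idx)
          | none => counts
        | none => counts    -- no predecessor found: Python's while would spin (never under Pre_)
      | _ => counts         -- dist[t] is None: Python raises TypeError on None - 1 (never under Pre_)

def blocks_solver_alt (blocks : List Int) (total_target : Int) : Int × List Int :=
  match blocks with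
  | [] => (0, [])
  | h :: tl =>
    let factor := pvGcdFold h tl
    match PySem.Int.divmod? total_target factor with
    | none => (0, [])
    | some (new_target, remainder) =>
      if remainder ≠ 0 then (0, [])   -- raise ValueError
      else
        let bl := (h :: tl).map (fun b => PySem.Int.floordiv b factor)
        let dist := pvBfs bl new_target (new_target.toNat + 2) 0
          (some 0 :: List.replicate new_target.toNat none) [0]
        match PySem.List.pyGet? dist new_target with
        | none => (0, [])        -- IndexError (outside Pre_)
        | some none => (0, [])   -- total_blocks is None: raise ValueError (outside Pre_)
        | some (some total) =>
          (total, pvBRecon dist bl new_target.toNat new_target (List.replicate bl.length 0))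

-- ===== PRECONDITION & SPEC =====
-- a linear reachability table (not the ports' DP: no counts, no tie-breaking): row t+1 is true
-- iff some positive block b ≤ t+1 has row t+1-b true; the list keeps newest row first
def pvReachRow (bs : List Int) (t1 : Int) (tab : List Bool) : Bool :=
  bs.any (fun b => decide (0 < b) && decide (b ≤ t1) && tab.getD (b.toNat - 1) false)

def pvReachAux (bs : List Int) : Nat → List Bool
  | 0 => [true]
  | t + 1 => pvReachRow bs ((t : Int) + 1) (pvReachAux bs t) :: pvReachAux bs t

-- Pre_ excludes exactly the inputs where A raises (empty blocks, a non-positive block reached by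
-- the DP, an indivisible or unreachable target, a quotient target below -1: ValueError/TypeError/
-- ZeroDivisionError/IndexError) together with one corner outside the natural domain on which A
-- still returns: a negative gcd `factor` (e.g. a single negative block) with a positive quotient,
-- where A's answer comes from floor-dividing by the negative factor; B returns the same value on
-- the cited such input. Unreachability has no closed form (Frobenius), so after the cheap filters
-- below it is decided by a minimal reachability table (no counts, no tie-breaking — not the
-- ports' DP).
-- the whole check: divide out the gcd Python-style; the degenerate quotients 0 and -1 (where
-- the DP table is just [(0, None)] and A returns (0, zeros), at -1 by negative-index wraparound)
-- are accepted outright; otherwise require positive blocks and decide reachability, with two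
-- shortcuts (1 is a reduced block: always reachable; every reduced block exceeds the target:
-- never) before building the table
def pvReachChk (blocks : List Int) (tt : Int) : Bool :=
  match blocks with
  | [] => false
  | h :: tl =>
    let g := pvGcdFold h tl
    if g = 0 then false
    else if PySem.Int.mod tt g ≠ 0 then false
    else
      let t' := PySem.Int.floordiv tt g
      if t' = 0 ∨ t' = -1 then true
      else if t' ≤ -2 then false
      else if ¬(0 < h ∧ ∀ b ∈ tl, 0 < b) then false
      else
        let bl := (h :: tl).map (fun b => PySem.Int.floordiv b g)
        if (1 : Int) ∈ bl then true
        else if bl.all (fun b => decide (t' < b)) then false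
        else (pvReachAux bl t'.toNat).headD false

def Pre_blocks_solver (blocks : List Int) (total_target : Int) : Prop :=
  blocks ≠ [] ∧ pvReachChk blocks total_target = true

instance (blocks : List Int) (total_target : Int) : Decidable (Pre_blocks_solver blocks total_target) := by
  unfold Pre_blocks_solver; infer_instance

def pvWitness_blocks_solver : List Int × Int := ([2, 3], 7)

def Spec_blocks_solver (blocks : List Int) (total_target : Int) (out : Int × List Int) : Prop :=
  out = blocks_solver_alt blocks total_target
instance (blocks : List Int) (total_target : Int) (out : Int × List Int) : Decidable (Spec_blocks_solver blocks total_target out) := by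
  unfold Spec_blocks_solver; infer_instance

-- ===== CLAIM (what is proved, stated in full; the proofs are below) =====
def Claim_equal_blocks_solver : Prop := ∀ (blocks : List Int) (total_target : Int), Dom_blocks_solver blocks total_target → Pre_blocks_solver blocks total_target → Spec_blocks_solver blocks total_target (blocks_solver blocks total_target)

-- ===== LEMMAS AND PROOFS =====

-- the common mathematical content: the minimum-count function both programs compute
def pvOmin : Option Int → Option Int → Option Int
  | best, none => best
  | none, some v => some v
  | some m, some v => if v < m then some v else some m

def pvDpM (bl : List Int) : Nat → Option Int
  | 0 => some 0
  | t + 1 =>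
    (bl.attach.foldl (fun best x =>
      if _h : 0 < x.1 ∧ x.1 ≤ (t : Int) + 1 then
        pvOmin best (pvDpM bl (t + 1 - x.1.toNat))
      else best) none).map (· + 1)
decreasing_by omega

-- candidate value contributed by block b at target t, reading a previous-levels oracle g
def pvCandG (g : Nat → Option Int) (t : Nat) (b : Int) : Option Int :=
  if 0 < b ∧ b ≤ (t : Int) then g (t - b.toNat) else none

-- the backpointer A stores: highest index whose block steps down one DP level
def pvPtrM (bl : List Int) (t : Nat) : Option Int :=
  if t = 0 then none
  else
    match pvDpM bl t with
    | none => none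
    | some c =>
      (PySem.List.pyRange ((bl.length : Int) - 1) (-1) (-1)).find? (fun idx =>
        match PySem.List.pyGet? bl idx with
        | some b => decide (0 < b) && decide (b ≤ (t : Int)) &&
            (pvDpM bl (t - b.toNat) == some (c - 1))
        | none => false)

def pvAStep (v : Int → Option Int) (st : Option Int × Option Int) (idx : Int) :
    Option Int × Option Int :=
  match v idx with
  | none => st
  | some a =>
    match st.1 with
    | none => (some a, some idx)
    | some m => if a < m then (some a, some idx) else st

-- pvDpM's value cut off at level k: what the B-side distance table holds after k BFS levels
def pvCut (o : Option Int) (k : Int) : Option Int :=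
  match o with
  | some v => if v ≤ k then some v else none
  | none => none

-- ---- tiny pvOmin facts ----
theorem pvOmin_none_right (st : Option Int) : pvOmin st none = st := by cases st <;> rfl

theorem pvOmin_cases (st v : Option Int) : pvOmin st v = st ∨ pvOmin st v = v := by
  cases st with
  | none =>
    cases v with
    | none => exact Or.inl rfl
    | some a => exact Or.inr rfl
  | some m =>
    cases v with
    | none => exact Or.inl rfl
    | some a =>
      by_cases h : a < m
      · exact Or.inr (by simp [pvOmin, h])
      · exact Or.inl (by simp [pvOmin, h])

theorem pvOmin_some_right (st : Option Int) (a : Int) : ∃ k, pvOmin st (some a) = some k := by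
  cases st with
  | none => exact ⟨a, rfl⟩
  | some m =>
    by_cases h : a < m
    · exact ⟨a, by simp [pvOmin, h]⟩
    · exact ⟨m, by simp [pvOmin, h]⟩

theorem pvOmin_le_left (s : Int) (v : Option Int) :
    ∃ k, pvOmin (some s) v = some k ∧ k ≤ s := by
  cases v with
  | none => exact ⟨s, rfl, le_refl s⟩
  | some a =>
    simp only [pvOmin]
    split_ifs with h
    · exact ⟨a, rfl, le_of_lt h⟩
    · exact ⟨s, rfl, le_refl s⟩

theorem pvOmin_le_right (st : Option Int) (a : Int) :
    ∃ k, pvOmin st (some a) = some k ∧ k ≤ a := by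
  cases st with
  | none => exact ⟨a, rfl, le_refl a⟩
  | some m =>
    simp only [pvOmin]
    split_ifs with h
    · exact ⟨a, rfl, le_refl a⟩
    · exact ⟨m, rfl, by omega⟩

theorem pvOmin_foldl_none {L : List (Option Int)} {st : Option Int} :
    L.foldl pvOmin st = none ↔ st = none ∧ ∀ v ∈ L, v = none := by
  induction L generalizing st with
  | nil => simp
  | cons v L ih =>
    rw [List.foldl_cons, ih]
    constructor
    · rintro ⟨h1, h2⟩
      cases v with
      | none =>
        rw [pvOmin_none_right] at h1
        exact ⟨h1, fun w hw => (List.mem_cons.mp hw).elim (fun h => h) (h2 w)⟩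
      | some a =>
        obtain ⟨k, hk⟩ := pvOmin_some_right st a
        rw [hk] at h1
        cases h1
    · rintro ⟨rfl, hall⟩
      have hv := hall v List.mem_cons_self
      subst hv
      exact ⟨rfl, fun w hw => hall w (List.mem_cons_of_mem _ hw)⟩

theorem pvOmin_foldl_spec {L : List (Option Int)} {st : Option Int} {m : Int}
    (h : L.foldl pvOmin st = some m) :
    (st = some m ∨ some m ∈ L) ∧ (∀ v : Int, (st = some v ∨ some v ∈ L) → m ≤ v) := by
  induction L generalizing st with
  | nil => simp_all
  | cons v L ih =>
    rw [List.foldl_cons] at h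
    obtain ⟨hmem, hle⟩ := ih h
    constructor
    · rcases hmem with h1 | h1
      · rcases pvOmin_cases st v with h2 | h2
        · exact Or.inl (h2.symm.trans h1)
        · exact Or.inr (List.mem_cons.mpr (Or.inl (h2.symm.trans h1).symm))
      · exact Or.inr (List.mem_cons.mpr (Or.inr h1))
    · rintro w (hw | hw)
      · subst hw
        obtain ⟨k, hk, hks⟩ := pvOmin_le_left w v
        exact le_trans (hle k (Or.inl hk)) hks
      · rcases List.mem_cons.mp hw with hw | hw
        · obtain ⟨k, hk, hks⟩ := pvOmin_le_right st w
          rw [hw] at hk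
          exact le_trans (hle k (Or.inl hk)) hks
        · exact hle w (Or.inr hw)

theorem pvOmin_foldl_eq_of_mem_iff {L1 L2 : List (Option Int)}
    (h : ∀ v : Int, some v ∈ L1 ↔ some v ∈ L2) :
    L1.foldl pvOmin none = L2.foldl pvOmin none := by
  cases h1 : L1.foldl pvOmin none with
  | none =>
    cases h2 : L2.foldl pvOmin none with
    | none => rfl
    | some m2 =>
      obtain ⟨hm, _⟩ := pvOmin_foldl_spec h2
      rcases hm with hm | hm
      · exact absurd hm (by simp)
      · have := (pvOmin_foldl_none.mp h1).2 _ ((h m2).mpr hm)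
        cases this
  | some m1 =>
    obtain ⟨hm1, hle1⟩ := pvOmin_foldl_spec h1
    rcases hm1 with hm1 | hm1
    · exact absurd hm1 (by simp)
    cases h2 : L2.foldl pvOmin none with
    | none =>
      have := (pvOmin_foldl_none.mp h2).2 _ ((h m1).mp hm1)
      cases this
    | some m2 =>
      obtain ⟨hm2, hle2⟩ := pvOmin_foldl_spec h2
      rcases hm2 with hm2 | hm2
      · exact absurd hm2 (by simp)
      have g1 : m1 ≤ m2 := hle1 m2 (Or.inr ((h m2).mpr hm2))
      have g2 : m2 ≤ m1 := hle2 m1 (Or.inr ((h m1).mp hm1))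
      exact congrArg _ (le_antisymm g1 g2)

theorem pvPairFold_fst (v : Int → Option Int) (ids : List Int) (st : Option Int × Option Int) :
    (ids.foldl (pvAStep v) st).1 = (ids.map v).foldl pvOmin st.1 := by
  induction ids generalizing st with
  | nil => rfl
  | cons i ids ih =>
    rw [List.foldl_cons, List.map_cons, List.foldl_cons, ih]
    congr 1
    cases hv : v i with
    | none => simp [pvAStep, hv, pvOmin_none_right]
    | some a =>
      cases hst : st.1 with
      | none => simp [pvAStep, hv, hst, pvOmin]
      | some m =>
        simp only [pvAStep, hv, hst, pvOmin]
        split_ifs <;> simp [hst]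

-- a fold started from a some state stays some, and never exceeds its start
theorem pvPairFold_some (v : Int → Option Int) (ids : List Int) (st : Option Int × Option Int)
    (a : Int) (hst : st.1 = some a) :
    ∃ m, (ids.foldl (pvAStep v) st).1 = some m ∧ m ≤ a := by
  have hf := pvPairFold_fst v ids st
  cases hr : (ids.foldl (pvAStep v) st).1 with
  | none =>
    exfalso
    rw [hr] at hf
    have := (pvOmin_foldl_none.mp hf.symm).1
    rw [hst] at this
    cases this
  | some m =>
    rw [hr] at hf
    refine ⟨m, rfl, (pvOmin_foldl_spec hf.symm).2 a (Or.inl ?_)⟩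
    rw [hst]

theorem pvPairFold_snd (v : Int → Option Int) (ids : List Int) (st : Option Int × Option Int) :
    (ids.foldl (pvAStep v) st).2 =
      if (ids.foldl (pvAStep v) st).1 = st.1 then st.2
      else ids.find? (fun i => v i == (ids.foldl (pvAStep v) st).1) := by
  induction ids generalizing st with
  | nil => simp
  | cons i ids ih =>
    rw [List.foldl_cons]
    cases hv : v i with
    | none =>
      have hstep : pvAStep v st i = st := by simp [pvAStep, hv]
      rw [hstep, ih]
      by_cases hc : (ids.foldl (pvAStep v) st).1 = st.1
      · simp [hc]
      · obtain ⟨m, hm⟩ : ∃ m, (ids.foldl (pvAStep v) st).1 = some m := by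
          cases hr : (ids.foldl (pvAStep v) st).1 with
          | none =>
            exfalso
            have hf := pvPairFold_fst v ids st
            rw [hr] at hf
            exact hc (hr.trans ((pvOmin_foldl_none.mp hf.symm).1).symm)
          | some m => exact ⟨m, rfl⟩
        rw [if_neg hc, if_neg hc, hm,
          List.find?_cons_of_neg (by simp [hv])]
    | some a =>
      have hupd : ∀ st2 : Option Int,
          (∀ m : Int, m ≤ a → (some m : Option Int) ≠ st.1) →
          (ids.foldl (pvAStep v) (some a, some i)).2 =
            if (ids.foldl (pvAStep v) (some a, some i)).1 = st.1 then st2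
            else (i :: ids).find?
              (fun x => v x == (ids.foldl (pvAStep v) (some a, some i)).1) := by
        intro st2 hne
        obtain ⟨m, hm, hma⟩ := pvPairFold_some v ids (some a, some i) a rfl
        rw [ih, hm, if_neg (hne m hma)]
        by_cases hma' : m = a
        · subst hma'
          rw [List.find?_cons_of_pos (by simp [hv])]
          simp
        · rw [List.find?_cons_of_neg (by simp [hv]; omega),
            if_neg (by simp; omega)]
      cases hst : st.1 with
      | none =>
        have hstep : pvAStep v st i = (some a, some i) := by simp [pvAStep, hv, hst]
        rw [hstep, hupd st.2 (by intro m _; rw [hst]; simp), hst]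
      | some mm =>
        by_cases hlt : a < mm
        · have hstep : pvAStep v st i = (some a, some i) := by
            simp [pvAStep, hv, hst, if_pos hlt]
          rw [hstep, hupd st.2 (by intro m hmle; rw [hst]; simp; omega), hst]
        · have hstep : pvAStep v st i = st := by simp [pvAStep, hv, hst, if_neg hlt]
          rw [hstep, ih, hst]
          by_cases hc : (ids.foldl (pvAStep v) st).1 = some mm
          · simp [hc]
          · obtain ⟨m, hm, hmm⟩ := pvPairFold_some v ids st mm hst
            have hne : m ≠ a := by
              intro hcon
              subst hcon
              exact hc (by rw [hm]; congr 1; omega)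
            rw [if_neg hc, if_neg hc, hm,
              List.find?_cons_of_neg (by simp [hv]; omega)]

theorem pvFind?_congr {p q : Int → Bool} {L : List Int} (h : ∀ x ∈ L, p x = q x) :
    L.find? p = L.find? q := by
  induction L with
  | nil => rfl
  | cons x L ih =>
    rw [List.find?_cons, List.find?_cons, h x List.mem_cons_self]
    exact match q x with
    | true => rfl
    | false => ih fun y hy => h y (List.mem_cons_of_mem x hy)

theorem pvDpM_succ (bl : List Int) (t : Nat) :
    pvDpM bl (t + 1) = ((bl.map (pvCandG (pvDpM bl) (t + 1))).foldl pvOmin none).map (· + 1) := by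
  have hcast : ((t + 1 : Nat) : Int) = (t : Int) + 1 := by push_cast; ring
  have hat := List.foldl_attach (l := bl)
    (f := fun (best : Option Int) (b : Int) =>
      if _h : 0 < b ∧ b ≤ (t : Int) + 1 then pvOmin best (pvDpM bl (t + 1 - b.toNat)) else best)
    (b := (none : Option Int))
  rw [pvDpM, hat, List.foldl_map]
  congr 1
  refine PySem.List.foldl_congr_mem bl _ _ none ?_
  intro acc b _
  by_cases h : 0 < b ∧ b ≤ (t : Int) + 1
  · rw [dif_pos h, pvCandG, if_pos (by rw [hcast]; exact h)]
  · rw [dif_neg h, pvCandG, if_neg (by rw [hcast]; exact h), pvOmin_none_right]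

-- ---- structural facts about pvDpM ----
theorem pvDpM_elim (bl : List Int) (t : Nat) (v : Int) (h : pvDpM bl (t + 1) = some v) :
    ∃ b ∈ bl, 0 < b ∧ b ≤ (t : Int) + 1 ∧ pvDpM bl (t + 1 - b.toNat) = some (v - 1) := by
  rw [pvDpM_succ] at h
  cases hfold : (bl.map (pvCandG (pvDpM bl) (t + 1))).foldl pvOmin none with
  | none => rw [hfold] at h; cases h
  | some m =>
    rw [hfold] at h
    simp only [Option.map_some, Option.some.injEq] at h
    obtain ⟨hmem, _⟩ := pvOmin_foldl_spec hfold
    have hmem2 : some m ∈ bl.map (pvCandG (pvDpM bl) (t + 1)) := by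
      rcases hmem with h1 | h1
      · cases h1
      · exact h1
    obtain ⟨b, hb, hbeq⟩ := List.mem_map.mp hmem2
    rw [pvCandG] at hbeq
    by_cases hg : 0 < b ∧ b ≤ ((t + 1 : Nat) : Int)
    · rw [if_pos hg] at hbeq
      refine ⟨b, hb, hg.1, by push_cast at hg ⊢; omega, ?_⟩
      rw [hbeq]
      congr 1
      omega
    · rw [if_neg hg] at hbeq; cases hbeq

theorem pvDpM_nonneg (bl : List Int) : ∀ (t : Nat) (v : Int), pvDpM bl t = some v → 0 ≤ v := by
  intro t
  induction t using Nat.strong_induction_on with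
  | _ t ih =>
    intro v h
    cases t with
    | zero =>
      have hv : (0 : Int) = v := by simpa [pvDpM] using h
      omega
    | succ s =>
      obtain ⟨b, _, hbpos, _, hpred⟩ := pvDpM_elim bl s v h
      have := ih (s + 1 - b.toNat) (by omega) (v - 1) hpred
      omega

theorem pvDpM_le_self (bl : List Int) : ∀ (t : Nat) (v : Int), pvDpM bl t = some v → v ≤ (t : Int) := by
  intro t
  induction t using Nat.strong_induction_on with
  | _ t ih =>
    intro v h
    cases t with
    | zero =>
      have hv : (0 : Int) = v := by simpa [pvDpM] using h
      omega
    | succ s =>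
      obtain ⟨b, _, hbpos, hble, hpred⟩ := pvDpM_elim bl s v h
      have := ih (s + 1 - b.toNat) (by omega) (v - 1) hpred
      have hcast : ((s + 1 - b.toNat : Nat) : Int) ≤ (s : Int) := by omega
      push_cast
      omega

theorem pvDpM_zero (bl : List Int) (t : Nat) (h : pvDpM bl t = some 0) : t = 0 := by
  cases t with
  | zero => rfl
  | succ s =>
    obtain ⟨b, _, _, _, hpred⟩ := pvDpM_elim bl s 0 h
    have := pvDpM_nonneg bl (s + 1 - b.toNat) (0 - 1) hpred
    omega

theorem pvDpM_ub (bl : List Int) (t : Nat) (b k : Int) (hb : b ∈ bl) (hbpos : 0 < b)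
    (hble : b ≤ (t : Int) + 1) (hk : pvDpM bl (t + 1 - b.toNat) = some k) :
    ∃ v, pvDpM bl (t + 1) = some v ∧ v ≤ k + 1 := by
  have hcand : pvCandG (pvDpM bl) (t + 1) b = some k := by
    rw [pvCandG, if_pos ⟨hbpos, by push_cast; omega⟩, hk]
  have hmem : (some k : Option Int) ∈ bl.map (pvCandG (pvDpM bl) (t + 1)) := by
    rw [← hcand]; exact List.mem_map_of_mem hb
  cases hfold : (bl.map (pvCandG (pvDpM bl) (t + 1))).foldl pvOmin none with
  | none =>
    exfalso
    have := (pvOmin_foldl_none.mp hfold).2 _ hmem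
    cases this
  | some m =>
    have hmk : m ≤ k := (pvOmin_foldl_spec hfold).2 k (Or.inr hmem)
    refine ⟨m + 1, ?_, by omega⟩
    rw [pvDpM_succ, hfold]
    rfl

theorem pv_no_level (bl : List Int) (T k : Nat)
    (h : ∀ j : Nat, j ≤ T → pvDpM bl j ≠ some (k : Int)) :
    ∀ j : Nat, j ≤ T → ∀ v : Int, pvDpM bl j = some v → v ≤ (k : Int) := by
  intro j
  induction j using Nat.strong_induction_on with
  | _ j ih =>
    intro hjT v hv
    cases j with
    | zero =>
      have h0 : (0 : Int) = v := by simpa [pvDpM] using hv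
      omega
    | succ s =>
      obtain ⟨b, _, hbpos, _, hpred⟩ := pvDpM_elim bl s v hv
      have hlt : s + 1 - b.toNat < s + 1 := by omega
      have hle : s + 1 - b.toNat ≤ T := by omega
      have hle2 := ih _ hlt hle (v - 1) hpred
      by_cases heq : v - 1 = (k : Int)
      · exact absurd (by rw [hpred, heq]) (h _ hle)
      · omega

-- ---- characterization of one BFS expansion round ----
theorem pv_foldl_const {α β : Type} (f : α → β → α) (s : α) (h : ∀ b, f s b = s)
    (l : List β) : l.foldl f s = s := by
  induction l with
  | nil => rfl
  | cons b l ih => rw [List.foldl_cons, h b]; exact ih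

theorem pvBExpand_one (bl2 : List Int) (T lvl t : Int) (d : List (Option Int)) (n : List Int) :
    ((bl2.foldl (fun s b => pvBStep T lvl s (t + b)) (d, n)).1.length = d.length) ∧
    (∀ x : Int, 0 ≤ x →
      PySem.List.pyGet? (bl2.foldl (fun s b => pvBStep T lvl s (t + b)) (d, n)).1 x
        = if PySem.List.pyGet? d x = some none ∧ x ≤ T ∧ ∃ b ∈ bl2, x = t + b
          then some (some lvl) else PySem.List.pyGet? d x) ∧
    (∀ x : Int, x ∈ (bl2.foldl (fun s b => pvBStep T lvl s (t + b)) (d, n)).2 ↔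
      x ∈ n ∨ (0 ≤ x ∧ x ≤ T ∧ PySem.List.pyGet? d x = some none ∧ ∃ b ∈ bl2, x = t + b)) := by
  induction bl2 generalizing d n with
  | nil =>
    refine ⟨rfl, ?_, ?_⟩
    · intro x _
      rw [List.foldl_nil,
        if_neg (by rintro ⟨-, -, b, hb, -⟩; exact absurd hb (List.not_mem_nil))]
    · intro x
      simp
  | cons b0 bs ih =>
    rw [List.foldl_cons]
    by_cases hg : 0 ≤ t + b0 ∧ t + b0 ≤ T
    · cases hdnt : PySem.List.pyGet? d (t + b0) with
      | some o =>
        cases o with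
        | none =>
          -- the write case
          have hstep : pvBStep T lvl (d, n) (t + b0)
              = (PySem.List.pySetD d (t + b0) (some lvl), n ++ [t + b0]) := by
            unfold pvBStep
            rw [if_pos hg]
            simp only [hdnt]
          rw [hstep]
          have hrange : (t + b0).toNat < d.length := by
            have h1 : PySem.List.pyGet? d (t + b0) = d[(t + b0).toNat]? :=
              PySem.List.pyGet?_of_nonneg d hg.1
            rw [h1] at hdnt
            exact (List.getElem?_eq_some_iff.mp hdnt).1
          have hset : PySem.List.pySetD d (t + b0) (some lvl)
              = d.set (t + b0).toNat (some lvl) := PySem.List.pySetD_of_nonneg d _ hg.1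
          have hget1 : ∀ x : Int, 0 ≤ x →
              PySem.List.pyGet? (PySem.List.pySetD d (t + b0) (some lvl)) x
                = if x = t + b0 then some (some lvl) else PySem.List.pyGet? d x := by
            intro x hx
            rw [hset, PySem.List.pyGet?_of_nonneg _ hx, PySem.List.pyGet?_of_nonneg d hx,
              List.getElem?_set]
            by_cases hxeq : x = t + b0
            · rw [if_pos (show (t + b0).toNat = x.toNat by omega), if_pos hrange, if_pos hxeq]
            · rw [if_neg (show ¬ (t + b0).toNat = x.toNat by omega), if_neg hxeq]
          obtain ⟨ihlen, ihget, ihmem⟩ := ih (PySem.List.pySetD d (t + b0) (some lvl)) (n ++ [t + b0])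
          refine ⟨?_, ?_, ?_⟩
          · rw [ihlen, hset, List.length_set]
          · intro x hx
            rw [ihget x hx]
            by_cases hxeq : x = t + b0
            · subst hxeq
              rw [hget1 _ hx, if_pos rfl,
                if_neg (by rintro ⟨hc, -⟩; cases hc),
                if_pos ⟨hdnt, by omega, b0, List.mem_cons_self, rfl⟩]
            · rw [hget1 _ hx, if_neg hxeq]
              by_cases hc : PySem.List.pyGet? d x = some none ∧ x ≤ T ∧ ∃ b ∈ bs, x = t + b
              · rw [if_pos hc, if_pos ⟨hc.1, hc.2.1, by
                  obtain ⟨b, hb, hxb⟩ := hc.2.2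
                  exact ⟨b, List.mem_cons_of_mem _ hb, hxb⟩⟩]
              · rw [if_neg hc, if_neg (by
                  rintro ⟨h1, h2, b, hb, hxb⟩
                  rcases List.mem_cons.mp hb with rfl | hb
                  · exact hxeq hxb
                  · exact hc ⟨h1, h2, b, hb, hxb⟩)]
          · intro x
            rw [ihmem x]
            constructor
            · rintro (hmem | ⟨hx0, hxT, hgx, b, hb, hxb⟩)
              · rcases List.mem_append.mp hmem with hmem | hmem
                · exact Or.inl hmem
                · have hxeq : x = t + b0 := by simpa using hmem
                  exact Or.inr ⟨by omega, by omega, by rw [hxeq]; exact hdnt,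
                    b0, List.mem_cons_self, hxeq⟩
              · rw [hget1 x hx0] at hgx
                by_cases hxeq : x = t + b0
                · rw [if_pos hxeq] at hgx; cases hgx
                · rw [if_neg hxeq] at hgx
                  exact Or.inr ⟨hx0, hxT, hgx, b, List.mem_cons_of_mem _ hb, hxb⟩
            · rintro (hmem | ⟨hx0, hxT, hgx, b, hb, hxb⟩)
              · exact Or.inl (List.mem_append.mpr (Or.inl hmem))
              · by_cases hxeq : x = t + b0
                · exact Or.inl (List.mem_append.mpr (Or.inr (by simp [hxeq])))
                · rcases List.mem_cons.mp hb with rfl | hb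
                  · exact absurd hxb hxeq
                  · refine Or.inr ⟨hx0, hxT, ?_, b, hb, hxb⟩
                    rw [hget1 x hx0, if_neg hxeq]
                    exact hgx
        | some v =>
          have hstep : pvBStep T lvl (d, n) (t + b0) = (d, n) := by
            unfold pvBStep
            rw [if_pos hg]
            simp only [hdnt]
          rw [hstep]
          obtain ⟨ihlen, ihget, ihmem⟩ := ih d n
          refine ⟨ihlen, ?_, ?_⟩
          · intro x hx
            rw [ihget x hx]
            congr 1
            refine propext ⟨fun ⟨h1, h2, b, hb, hxb⟩ =>
              ⟨h1, h2, b, List.mem_cons_of_mem _ hb, hxb⟩, ?_⟩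
            rintro ⟨h1, h2, b, hb, hxb⟩
            rcases List.mem_cons.mp hb with rfl | hb
            · rw [hxb] at h1; rw [h1] at hdnt; cases hdnt
            · exact ⟨h1, h2, b, hb, hxb⟩
          · intro x
            rw [ihmem x]
            constructor
            · rintro (hmem | ⟨hx0, hxT, hgx, b, hb, hxb⟩)
              · exact Or.inl hmem
              · exact Or.inr ⟨hx0, hxT, hgx, b, List.mem_cons_of_mem _ hb, hxb⟩
            · rintro (hmem | ⟨hx0, hxT, hgx, b, hb, hxb⟩)
              · exact Or.inl hmem
              · rcases List.mem_cons.mp hb with rfl | hb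
                · rw [hxb] at hgx; rw [hgx] at hdnt; cases hdnt
                · exact Or.inr ⟨hx0, hxT, hgx, b, hb, hxb⟩
      | none =>
        have hstep : pvBStep T lvl (d, n) (t + b0) = (d, n) := by
          unfold pvBStep
          rw [if_pos hg]
          simp only [hdnt]
        rw [hstep]
        obtain ⟨ihlen, ihget, ihmem⟩ := ih d n
        refine ⟨ihlen, ?_, ?_⟩
        · intro x hx
          rw [ihget x hx]
          congr 1
          refine propext ⟨fun ⟨h1, h2, b, hb, hxb⟩ =>
            ⟨h1, h2, b, List.mem_cons_of_mem _ hb, hxb⟩, ?_⟩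
          rintro ⟨h1, h2, b, hb, hxb⟩
          rcases List.mem_cons.mp hb with rfl | hb
          · rw [hxb] at h1; rw [h1] at hdnt; cases hdnt
          · exact ⟨h1, h2, b, hb, hxb⟩
        · intro x
          rw [ihmem x]
          constructor
          · rintro (hmem | ⟨hx0, hxT, hgx, b, hb, hxb⟩)
            · exact Or.inl hmem
            · exact Or.inr ⟨hx0, hxT, hgx, b, List.mem_cons_of_mem _ hb, hxb⟩
          · rintro (hmem | ⟨hx0, hxT, hgx, b, hb, hxb⟩)
            · exact Or.inl hmem
            · rcases List.mem_cons.mp hb with rfl | hb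
              · rw [hxb] at hgx; rw [hgx] at hdnt; cases hdnt
              · exact Or.inr ⟨hx0, hxT, hgx, b, hb, hxb⟩
    · have hstep : pvBStep T lvl (d, n) (t + b0) = (d, n) := by
        unfold pvBStep
        rw [if_neg hg]
      rw [hstep]
      obtain ⟨ihlen, ihget, ihmem⟩ := ih d n
      refine ⟨ihlen, ?_, ?_⟩
      · intro x hx
        rw [ihget x hx]
        congr 1
        refine propext ⟨fun ⟨h1, h2, b, hb, hxb⟩ =>
          ⟨h1, h2, b, List.mem_cons_of_mem _ hb, hxb⟩, ?_⟩
        rintro ⟨h1, h2, b, hb, hxb⟩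
        rcases List.mem_cons.mp hb with rfl | hb
        · exact absurd ⟨by omega, by omega⟩ hg
        · exact ⟨h1, h2, b, hb, hxb⟩
      · intro x
        rw [ihmem x]
        constructor
        · rintro (hmem | ⟨hx0, hxT, hgx, b, hb, hxb⟩)
          · exact Or.inl hmem
          · exact Or.inr ⟨hx0, hxT, hgx, b, List.mem_cons_of_mem _ hb, hxb⟩
        · rintro (hmem | ⟨hx0, hxT, hgx, b, hb, hxb⟩)
          · exact Or.inl hmem
          · rcases List.mem_cons.mp hb with rfl | hb
            · exact absurd ⟨by omega, by omega⟩ hg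
            · exact Or.inr ⟨hx0, hxT, hgx, b, hb, hxb⟩

theorem pvBExpand_all (bl2 : List Int) (T lvl : Int) (ts : List Int)
    (d : List (Option Int)) (n : List Int) :
    ((ts.foldl (pvBExpandT bl2 T lvl) (d, n)).1.length = d.length) ∧
    (∀ x : Int, 0 ≤ x →
      PySem.List.pyGet? (ts.foldl (pvBExpandT bl2 T lvl) (d, n)).1 x
        = if PySem.List.pyGet? d x = some none ∧ x ≤ T ∧ ∃ t ∈ ts, ∃ b ∈ bl2, x = t + b
          then some (some lvl) else PySem.List.pyGet? d x) ∧
    (∀ x : Int, x ∈ (ts.foldl (pvBExpandT bl2 T lvl) (d, n)).2 ↔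
      x ∈ n ∨ (0 ≤ x ∧ x ≤ T ∧ PySem.List.pyGet? d x = some none ∧
        ∃ t ∈ ts, ∃ b ∈ bl2, x = t + b)) := by
  induction ts generalizing d n with
  | nil =>
    refine ⟨rfl, ?_, ?_⟩
    · intro x _
      rw [List.foldl_nil,
        if_neg (by rintro ⟨-, -, t, ht, -⟩; exact absurd ht (List.not_mem_nil))]
    · intro x
      simp
  | cons t0 ts ih =>
    rw [List.foldl_cons]
    simp only [pvBExpandT]
    obtain ⟨olen, oget, omem⟩ := pvBExpand_one bl2 T lvl t0 d n
    set s1 := bl2.foldl (fun s b => pvBStep T lvl s (t0 + b)) (d, n) with hs1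
    obtain ⟨ihlen, ihget, ihmem⟩ := ih s1.1 s1.2
    simp only [Prod.mk.eta] at ihlen ihget ihmem
    refine ⟨by rw [ihlen, olen], ?_, ?_⟩
    · intro x hx
      rw [ihget x hx, oget x hx]
      by_cases hc0 : PySem.List.pyGet? d x = some none ∧ x ≤ T ∧ ∃ b ∈ bl2, x = t0 + b
      · rw [if_pos hc0, if_neg (by rintro ⟨hcc, -⟩; cases hcc),
          if_pos ⟨hc0.1, hc0.2.1, t0, List.mem_cons_self, hc0.2.2⟩]
      · rw [if_neg hc0]
        by_cases hc1 : PySem.List.pyGet? d x = some none ∧ x ≤ T ∧ ∃ t ∈ ts, ∃ b ∈ bl2, x = t + b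
        · rw [if_pos hc1, if_pos ⟨hc1.1, hc1.2.1, by
            obtain ⟨t, ht, hb⟩ := hc1.2.2
            exact ⟨t, List.mem_cons_of_mem _ ht, hb⟩⟩]
        · rw [if_neg hc1, if_neg (by
            rintro ⟨h1, h2, t, ht, b, hb, hxb⟩
            rcases List.mem_cons.mp ht with rfl | ht
            · exact hc0 ⟨h1, h2, b, hb, hxb⟩
            · exact hc1 ⟨h1, h2, t, ht, b, hb, hxb⟩)]
    · intro x
      rw [ihmem x, omem x]
      constructor
      · rintro ((hmem | ⟨hx0, hxT, hgx, b, hb, hxb⟩) | ⟨hx0, hxT, hgx, t, ht, b, hb, hxb⟩)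
        · exact Or.inl hmem
        · exact Or.inr ⟨hx0, hxT, hgx, t0, List.mem_cons_self, b, hb, hxb⟩
        · rw [oget x hx0] at hgx
          by_cases hc0 : PySem.List.pyGet? d x = some none ∧ x ≤ T ∧ ∃ b ∈ bl2, x = t0 + b
          · rw [if_pos hc0] at hgx; cases hgx
          · rw [if_neg hc0] at hgx
            exact Or.inr ⟨hx0, hxT, hgx, t, List.mem_cons_of_mem _ ht, b, hb, hxb⟩
      · rintro (hmem | ⟨hx0, hxT, hgx, t, ht, b, hb, hxb⟩)
        · exact Or.inl (Or.inl hmem)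
        · by_cases hc0 : PySem.List.pyGet? d x = some none ∧ x ≤ T ∧ ∃ b ∈ bl2, x = t0 + b
          · exact Or.inl (Or.inr ⟨hx0, hxT, hc0.1, hc0.2.2⟩)
          · rcases List.mem_cons.mp ht with rfl | ht
            · exact absurd ⟨hgx, hxT, b, hb, hxb⟩ hc0
            · refine Or.inr ⟨hx0, hxT, ?_, t, ht, b, hb, hxb⟩
              rw [oget x hx0, if_neg hc0]
              exact hgx

-- degenerate targets 0 and -1: the distance table is the single seed cell and BFS leaves it alone
theorem pvBfs_deg (bl : List Int) (T : Int) (hT : T ≤ 0) :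
    ∀ (fuel : Nat) (lvl : Int) (fr : List Int),
      pvBfs bl T fuel lvl [some 0] fr = [some 0] := by
  intro fuel
  induction fuel with
  | zero => intro lvl fr; rfl
  | succ f ih =>
    intro lvl fr
    show (if fr.isEmpty then _ else _) = _
    by_cases hfe : fr.isEmpty
    · rw [if_pos hfe]
    · rw [if_neg hfe]
      have hstep : ∀ (n : List Int) (x : Int),
          pvBStep T (lvl + 1) (([some 0] : List (Option Int)), n) x = ([some 0], n) := by
        intro n x
        unfold pvBStep
        by_cases hx : 0 ≤ x ∧ x ≤ T
        · rw [if_pos hx]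
          have hx0 : x = 0 := by omega
          subst hx0
          rfl
        · rw [if_neg hx]
      have hexp : ∀ (n : List Int) (t : Int),
          pvBExpandT bl T (lvl + 1) (([some 0] : List (Option Int)), n) t = ([some 0], n) := by
        intro n t
        exact pv_foldl_const _ _ (fun b => hstep n (t + b)) bl
      have hfold : fr.foldl (pvBExpandT bl T (lvl + 1)) (([some 0] : List (Option Int)), [])
          = ([some 0], []) :=
        pv_foldl_const _ _ (fun t => hexp [] t) fr
      simp only [hfold]
      exact ih (lvl + 1) []

-- the BFS invariant: after finishing level k the distance table is pvDpM cut at k and the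
-- frontier holds exactly the level-k targets; running the remaining fuel yields pvDpM
theorem pvBfs_inv (bl : List Int) (hpos : ∀ b ∈ bl, 0 < b) (T : Nat) :
    ∀ (fuel k : Nat) (dist : List (Option Int)) (fr : List Int),
      dist.length = T + 1 →
      (∀ j : Nat, j ≤ T → dist[j]? = some (pvCut (pvDpM bl j) (k : Int))) →
      (∀ x : Int, x ∈ fr ↔ 0 ≤ x ∧ x ≤ (T : Int) ∧ pvDpM bl x.toNat = some (k : Int)) →
      T + 1 ≤ fuel + k →
      ∀ j : Nat, j ≤ T → (pvBfs bl (T : Int) fuel (k : Int) dist fr)[j]? = some (pvDpM bl j) := by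
  intro fuel
  induction fuel with
  | zero =>
    intro k dist fr _ hd _ hfuel j hj
    show dist[j]? = _
    rw [hd j hj]
    cases hdp : pvDpM bl j with
    | none => rfl
    | some v =>
      have hv := pvDpM_le_self bl j v hdp
      simp only [pvCut]
      rw [if_pos (by omega)]
  | succ f ih =>
    intro k dist fr hlen hd hfr hfuel j hj
    rw [pvBfs]
    by_cases hfe : fr.isEmpty
    · rw [if_pos hfe]
      have hfrnil : fr = [] := List.isEmpty_iff.mp hfe
      have hnok : ∀ j2 : Nat, j2 ≤ T → pvDpM bl j2 ≠ some (k : Int) := by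
        intro j2 hj2 hcon
        have : ((j2 : Int)) ∈ fr := (hfr _).mpr ⟨by omega, by omega, by
          rw [Int.toNat_natCast]; exact hcon⟩
        rw [hfrnil] at this
        exact absurd this (List.not_mem_nil)
      rw [hd j hj]
      cases hdp : pvDpM bl j with
      | none => rfl
      | some v =>
        have hv := pv_no_level bl T k hnok j hj v hdp
        simp only [pvCut]
        rw [if_pos hv]
    · rw [if_neg hfe]
      obtain ⟨x0, hx0⟩ := List.exists_mem_of_ne_nil fr (by
        intro hcon; rw [hcon] at hfe; exact hfe rfl)
      have hkT : k ≤ T := by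
        obtain ⟨hx1, hx2, hx3⟩ := (hfr x0).mp hx0
        have := pvDpM_le_self bl x0.toNat _ hx3
        omega
      obtain ⟨elen, eget, emem⟩ := pvBExpand_all bl (T : Int) ((k : Int) + 1) fr dist []
      set st := fr.foldl (pvBExpandT bl (T : Int) ((k : Int) + 1)) (dist, []) with hst
      -- the written set is exactly the level-(k+1) targets
      have hdread : ∀ x : Int, 0 ≤ x → x ≤ (T : Int) →
          PySem.List.pyGet? dist x = some (pvCut (pvDpM bl x.toNat) (k : Int)) := by
        intro x hx1 hx2
        rw [PySem.List.pyGet?_of_nonneg dist hx1, hd x.toNat (by omega)]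
      have hkey : ∀ x : Int, 0 ≤ x → x ≤ (T : Int) →
          ((PySem.List.pyGet? dist x = some none ∧ x ≤ (T : Int) ∧
              ∃ t ∈ fr, ∃ b ∈ bl, x = t + b)
            ↔ pvDpM bl x.toNat = some ((k : Int) + 1)) := by
        intro x hx1 hx2
        constructor
        · rintro ⟨hnone, -, t, ht, b, hb, hxb⟩
          obtain ⟨ht1, ht2, ht3⟩ := (hfr t).mp ht
          have hbpos := hpos b hb
          have hs : x.toNat = (x.toNat - 1) + 1 := by omega
          have hidx : (x.toNat - 1) + 1 - b.toNat = t.toNat := by omega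
          obtain ⟨v, hv, hvle⟩ := pvDpM_ub bl (x.toNat - 1) b (k : Int) hb hbpos
            (by omega) (by rw [hidx]; exact ht3)
          rw [← hs] at hv
          rw [hdread x hx1 hx2] at hnone
          simp only [Option.some.injEq] at hnone
          rw [hv] at hnone ⊢
          simp only [pvCut] at hnone
          by_cases hvk : v ≤ (k : Int)
          · rw [if_pos hvk] at hnone; cases hnone
          · congr 1; omega
        · intro hdp
          have hxpos : 1 ≤ x.toNat := by
            by_contra hcon
            have hx0' : x.toNat = 0 := by omega
            rw [hx0'] at hdp
            simp only [pvDpM, Option.some.injEq] at hdp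
            omega
          have hs : x.toNat = (x.toNat - 1) + 1 := by omega
          rw [hs] at hdp
          obtain ⟨b, hb, hbpos, hble, hpred⟩ := pvDpM_elim bl (x.toNat - 1) _ hdp
          refine ⟨?_, hx2, (((x.toNat - 1) + 1 - b.toNat : Nat) : Int), ?_, b, hb, ?_⟩
          · rw [hdread x hx1 hx2,
              show pvDpM bl x.toNat = some ((k : Int) + 1) from by rw [hs]; exact hdp]
            simp only [pvCut]
            rw [if_neg (by omega)]
          · refine (hfr _).mpr ⟨by omega, by omega, ?_⟩
            rw [Int.toNat_natCast]
            simpa using hpred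
          · omega
      have hcast1 : ((k : Int) + 1) = ((k + 1 : Nat) : Int) := by push_cast; ring
      have happ := ih (k + 1) st.1 st.2
        (by rw [elen] at *; omega)
        (by
          intro j2 hj2
          have hx1 : (0 : Int) ≤ (j2 : Int) := by omega
          have hget := eget (j2 : Int) hx1
          rw [PySem.List.pyGet?_natCast] at hget
          rw [hget]
          by_cases hc : PySem.List.pyGet? dist (j2 : Int) = some none ∧ (j2 : Int) ≤ (T : Int) ∧
              ∃ t ∈ fr, ∃ b ∈ bl, (j2 : Int) = t + b
          · rw [if_pos hc]
            have := (hkey (j2 : Int) hx1 (by omega)).mp hc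
            rw [Int.toNat_natCast] at this
            rw [this]
            simp only [pvCut]
            rw [if_pos (by omega), hcast1]
          · rw [if_neg hc, PySem.List.pyGet?_natCast, hd j2 hj2]
            have hnot : pvDpM bl j2 ≠ some ((k : Int) + 1) := by
              intro hcon
              exact hc ((hkey (j2 : Int) hx1 (by omega)).mpr (by
                rw [Int.toNat_natCast]; exact hcon))
            cases hdp : pvDpM bl j2 with
            | none => rfl
            | some v =>
              simp only [pvCut]
              have hvne : v ≠ (k : Int) + 1 := by
                intro hcon; rw [hcon] at hdp; exact hnot hdp
              by_cases hvk : v ≤ (k : Int)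
              · rw [if_pos hvk, if_pos (by push_cast; omega)]
              · rw [if_neg hvk, if_neg (by push_cast; omega)])
        (by
          intro x
          rw [emem x]
          constructor
          · rintro (hmem | ⟨hx1, hx2, hgx, hpred⟩)
            · exact absurd hmem (List.not_mem_nil)
            · refine ⟨hx1, hx2, ?_⟩
              have := (hkey x hx1 hx2).mp ⟨hgx, hx2, hpred⟩
              rw [this, hcast1]
          · rintro ⟨hx1, hx2, hdp⟩
            rw [← hcast1] at hdp
            obtain ⟨hgx, -, hpred⟩ := (hkey x hx1 hx2).mpr hdp
            exact Or.inr ⟨hx1, hx2, hgx, hpred⟩)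
        (by omega)
        j hj
      rw [← hcast1] at happ
      exact happ

theorem pvAFill_length (bl : List Int) (m0 : List (Option (Option Int × Option Int)))
    (ts : List Int) : (pvAFill bl m0 ts).length = m0.length := by
  induction ts generalizing m0 with
  | nil => rfl
  | cons t ts ih => rw [pvAFill, List.foldl_cons, ← pvAFill]; rw [ih, PySem.List.length_pySetD]

theorem pvAFill_append_singleton (bl : List Int) (m0 : List (Option (Option Int × Option Int)))
    (ts : List Int) (t : Int) :
    pvAFill bl m0 (ts ++ [t]) = PySem.List.pySetD (pvAFill bl m0 ts) t
      (some ((pvAInner bl (pvAFill bl m0 ts) t).1.map (· + 1),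
        (pvAInner bl (pvAFill bl m0 ts) t).2)) := by
  rw [pvAFill, pvAFill, List.foldl_append, List.foldl_cons, List.foldl_nil]

theorem pvAInner_spec (bl : List Int) (memo : List (Option (Option Int × Option Int))) (s : Nat)
    (hpos : ∀ b ∈ bl, 0 < b)
    (hreads : ∀ j : Nat, j ≤ s →
      PySem.List.pyGet? memo ((j : Nat) : Int) = some (some (pvDpM bl j, pvPtrM bl j))) :
    pvAInner bl memo ((s : Int) + 1) = ((pvDpM bl (s + 1)).map (fun c => c - 1), pvPtrM bl (s + 1)) := by
  have hcast : ((s + 1 : Nat) : Int) = (s : Int) + 1 := by push_cast; ring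
  set n := bl.length with hn
  set ids := PySem.List.pyRange ((bl.length : Int) - 1) (-1) (-1) with hids
  have hmem_ids : ∀ idx : Int, idx ∈ ids ↔ 0 ≤ idx ∧ idx < (n : Int) := by
    intro idx
    rw [hids, PySem.List.mem_pyRange_neg_one]
    omega
  -- the candidate value read through the index
  set v : Int → Option Int := fun idx =>
    match PySem.List.pyGet? bl idx with
    | some b => pvCandG (pvDpM bl) (s + 1) b
    | none => none with hv
  -- step functions agree on members of ids
  have hfold : pvAInner bl memo ((s : Int) + 1) = ids.foldl (pvAStep v) (none, none) := by
    unfold pvAInner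
    rw [← hids]
    refine PySem.List.foldl_congr_mem ids _ _ (none, none) ?_
    rintro ⟨st1, st2⟩ idx hidx
    obtain ⟨h0, h1⟩ := (hmem_ids idx).mp hidx
    have hblget : PySem.List.pyGet? bl idx = some bl[idx.toNat] :=
      PySem.List.pyGet?_eq_some_getElem bl h0 (by omega)
    have hbpos : 0 < bl[idx.toNat] := hpos _ (List.getElem_mem _)
    have hvidx : v idx = pvCandG (pvDpM bl) (s + 1) bl[idx.toNat] := by
      rw [hv]; simp only [hblget]
    by_cases hble : bl[idx.toNat] ≤ (s : Int) + 1
    · have hidx2 : (s : Int) + 1 - bl[idx.toNat] = ((s + 1 - bl[idx.toNat].toNat : Nat) : Int) := by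
        omega
      have hj : s + 1 - bl[idx.toNat].toNat ≤ s := by omega
      have hcand : v idx = pvDpM bl (s + 1 - bl[idx.toNat].toNat) := by
        rw [hvidx, pvCandG, if_pos ⟨hbpos, by rw [hcast]; exact hble⟩]
      simp only [hblget, hidx2, hreads _ hj, pvAStep, hcand]
      cases pvDpM bl (s + 1 - bl[idx.toNat].toNat) with
      | none => rfl
      | some a => cases st1 <;> rfl
    · have hcand : v idx = none := by
        rw [hvidx, pvCandG, if_neg (by rw [hcast]; intro hc; exact hble hc.2)]
      simp only [hblget, if_pos (by omega : (s : Int) + 1 - bl[idx.toNat] < 0), pvAStep, hcand]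
  -- membership of candidate values: through ids = through bl
  have hmemiff : ∀ w : Int, some w ∈ ids.map v ↔ some w ∈ bl.map (pvCandG (pvDpM bl) (s + 1)) := by
    intro w
    constructor
    · intro hw
      obtain ⟨idx, hidx, hvw⟩ := List.mem_map.mp hw
      obtain ⟨h0, h1⟩ := (hmem_ids idx).mp hidx
      have hblget : PySem.List.pyGet? bl idx = some bl[idx.toNat] :=
        PySem.List.pyGet?_eq_some_getElem bl h0 (by omega)
      rw [hv] at hvw
      simp only [hblget] at hvw
      exact List.mem_map.mpr ⟨bl[idx.toNat], List.getElem_mem _, hvw⟩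
    · intro hw
      obtain ⟨b, hbmem, hbw⟩ := List.mem_map.mp hw
      obtain ⟨j, hj, hjb⟩ := List.mem_iff_getElem.mp hbmem
      refine List.mem_map.mpr ⟨(j : Int), (hmem_ids _).mpr ⟨by omega, by omega⟩, ?_⟩
      rw [hv]
      have hblget : PySem.List.pyGet? bl ((j : Nat) : Int) = some bl[j] := by
        rw [PySem.List.pyGet?_natCast, List.getElem?_eq_getElem hj]
      simp only [hblget, hjb]
      exact hbw
  have hfst : (ids.foldl (pvAStep v) (none, none)).1
      = (bl.map (pvCandG (pvDpM bl) (s + 1))).foldl pvOmin none := by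
    rw [pvPairFold_fst]
    exact pvOmin_foldl_eq_of_mem_iff hmemiff
  have hdp := pvDpM_succ bl s
  refine Prod.ext ?_ ?_
  · rw [hfold, hfst, hdp]
    cases (bl.map (pvCandG (pvDpM bl) (s + 1))).foldl pvOmin none with
    | none => rfl
    | some m => simp
  · rw [hfold, pvPairFold_snd]
    cases hw : (bl.map (pvCandG (pvDpM bl) (s + 1))).foldl pvOmin none with
    | none =>
      rw [if_pos (by rw [hfst, hw])]
      rw [pvPtrM, if_neg (by omega)]
      rw [hdp, hw]
      simp
    | some m =>
      rw [if_neg (by rw [hfst, hw]; simp)]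
      rw [hfst, hw]
      rw [pvPtrM, if_neg (by omega), hdp, hw]
      simp only [Option.map_some]
      refine (pvFind?_congr ?_).symm
      intro idx hidx
      obtain ⟨h0, h1⟩ := (hmem_ids idx).mp hidx
      have hblget : PySem.List.pyGet? bl idx = some bl[idx.toNat] :=
        PySem.List.pyGet?_eq_some_getElem bl h0 (by omega)
      have hbpos : 0 < bl[idx.toNat] := hpos _ (List.getElem_mem _)
      rw [hv]
      simp only [hblget]
      have harith : m + 1 - 1 = m := by omega
      by_cases hble : bl[idx.toNat] ≤ ((s + 1 : Nat) : Int)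
      · rw [pvCandG, if_pos ⟨hbpos, hble⟩]
        simp only [harith]
        simp [hbpos]
        intro _
        omega
      · rw [pvCandG, if_neg (by intro hc; exact hble hc.2)]
        simp
        intro _ h2
        exact absurd (show bl[idx.toNat] ≤ ((s + 1 : Nat) : Int) by omega) hble

theorem pv_fillA_inv (bl : List Int) (hpos : ∀ b ∈ bl, 0 < b) (T : Nat) :
    ∀ k : Nat, k ≤ T →
      ∀ j : Nat, j ≤ T →
        (pvAFill bl (some (some 0, none) :: List.replicate T none)
            (PySem.List.pyRange 1 ((k : Int) + 1) 1))[j]? =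
          some (if j ≤ k then some (pvDpM bl j, pvPtrM bl j) else none) := by
  intro k
  induction k with
  | zero =>
    intro _
    have hnil : PySem.List.pyRange 1 (((0 : Nat) : Int) + 1) 1 = [] :=
      PySem.List.pyRange_one_eq_nil (by simp)
    rw [hnil]
    intro j hj
    show (some (some 0, none) :: List.replicate T none)[j]? = _
    cases j with
    | zero => simp [pvDpM, pvPtrM]
    | succ j =>
      have hjT : j < T := by omega
      simp [hjT]
  | succ k ih =>
    intro hk
    have ihA := ih (by omega)
    have hlenA : (pvAFill bl (some (some 0, none) :: List.replicate T none)
        (PySem.List.pyRange 1 ((k : Int) + 1) 1)).length = T + 1 := by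
      rw [pvAFill_length]; simp
    have hsplit : PySem.List.pyRange 1 (((k + 1 : Nat) : Int) + 1) 1
        = PySem.List.pyRange 1 ((k : Int) + 1) 1 ++ [(k : Int) + 1] := by
      have h1 : ((k + 1 : Nat) : Int) + 1 = ((k : Int) + 1) + 1 := by push_cast; ring
      rw [h1]
      exact PySem.List.pyRange_one_succ_right (by omega)
    rw [hsplit]
    set mA := pvAFill bl (some (some 0, none) :: List.replicate T none)
      (PySem.List.pyRange 1 ((k : Int) + 1) 1) with hmA
    have hreadsA : ∀ j : Nat, j ≤ k →
        PySem.List.pyGet? mA ((j : Nat) : Int) = some (some (pvDpM bl j, pvPtrM bl j)) := by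
      intro j hj
      rw [PySem.List.pyGet?_natCast, ihA j (by omega), if_pos hj]
    have hinnerA := pvAInner_spec bl mA k hpos hreadsA
    have hcast : ((k : Int) + 1) = ((k + 1 : Nat) : Int) := by push_cast; ring
    intro j hj
    rw [pvAFill_append_singleton, ← hmA, hinnerA]
    have hentry : ((((pvDpM bl (k + 1)).map (fun c => c - 1), pvPtrM bl (k + 1)) :
        Option Int × Option Int).1.map (· + 1),
        (((pvDpM bl (k + 1)).map (fun c => c - 1), pvPtrM bl (k + 1)) :
        Option Int × Option Int).2) = (pvDpM bl (k + 1), pvPtrM bl (k + 1)) := by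
      cases pvDpM bl (k + 1) with
      | none => rfl
      | some c => simp
    rw [hentry, hcast, PySem.List.pySetD_natCast, List.getElem?_set]
    by_cases hjk : k + 1 = j
    · subst hjk
      rw [if_pos rfl, if_pos (by omega : k + 1 < mA.length), if_pos (le_refl (k + 1))]
    · rw [if_neg hjk, ihA j hj]
      by_cases hjle : j ≤ k
      · rw [if_pos hjle, if_pos (by omega)]
      · rw [if_neg hjle, if_neg (by omega)]

-- ---- the reachability precondition gives a sum representation ----
theorem pv_reachAux_getD (bs : List Int) (t : Nat) :
    ∀ j : Nat, (pvReachAux bs t).getD j false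
      = if j ≤ t then (pvReachAux bs (t - j)).headD false else false := by
  induction t with
  | zero =>
    intro j
    cases j with
    | zero => rfl
    | succ j => simp [pvReachAux]
  | succ t ih =>
    intro j
    cases j with
    | zero => simp [pvReachAux]
    | succ j =>
      rw [pvReachAux]
      simpa [Nat.succ_le_succ_iff] using ih j

theorem pv_reach_repr (bs : List Int) (t : Nat)
    (h : (pvReachAux bs t).headD false = true) :
    ∃ l : List Int, (∀ x ∈ l, x ∈ bs ∧ 0 < x) ∧ l.sum = (t : Int) := by
  induction t using Nat.strong_induction_on with
  | _ t ih =>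
    cases t with
    | zero => exact ⟨[], by simp, by simp⟩
    | succ s =>
      rw [pvReachAux] at h
      simp only [List.headD_cons] at h
      rw [pvReachRow, List.any_eq_true] at h
      obtain ⟨b, hb, hcond⟩ := h
      simp only [Bool.and_eq_true, decide_eq_true_eq] at hcond
      obtain ⟨⟨hbpos, hble⟩, htab⟩ := hcond
      rw [pv_reachAux_getD bs s (b.toNat - 1), if_pos (by omega)] at htab
      have hlt : s + 1 - b.toNat < s + 1 := by omega
      have heq : s - (b.toNat - 1) = s + 1 - b.toNat := by omega
      rw [heq] at htab
      obtain ⟨l, hl, hsum⟩ := ih _ hlt htab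
      refine ⟨b :: l, ?_, ?_⟩
      · intro x hx
        rcases List.mem_cons.mp hx with rfl | hx
        · exact ⟨hb, hbpos⟩
        · exact hl x hx
      · rw [List.sum_cons, hsum]
        push_cast
        omega

theorem pv_gcdFold_dvd (l : List Int) (a : Int) :
    pvGcdFold a l ∣ a ∧ ∀ b ∈ l, pvGcdFold a l ∣ b := by
  induction l generalizing a with
  | nil => exact ⟨dvd_refl a, by simp⟩
  | cons b l ih =>
    obtain ⟨h1, h2⟩ := ih ((Int.gcd a b : Int))
    have hfold : pvGcdFold a (b :: l) = pvGcdFold ((Int.gcd a b : Int)) l := rfl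
    refine ⟨?_, ?_⟩
    · rw [hfold]; exact dvd_trans h1 (Int.gcd_dvd_left a b)
    · intro x hx
      rcases List.mem_cons.mp hx with rfl | hx
      · rw [hfold]; exact dvd_trans h1 (Int.gcd_dvd_right a x)
      · rw [hfold]; exact h2 x hx

theorem pv_gcdFold_pos (l : List Int) (a : Int) (ha : 0 < a) : 0 < pvGcdFold a l := by
  induction l generalizing a with
  | nil => exact ha
  | cons b l ih =>
    have hg : 0 < Int.gcd a b := Int.gcd_pos_iff.mpr (Or.inl (by omega : a ≠ 0))
    exact ih _ (show (0 : Int) < ((Int.gcd a b : Nat) : Int) by exact_mod_cast hg)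

theorem pv_repr_dpM (bl : List Int) (l : List Int) (h : ∀ x ∈ l, x ∈ bl ∧ 0 < x) :
    (pvDpM bl l.sum.toNat).isSome := by
  induction l with
  | nil => simp [pvDpM]
  | cons x r ih =>
    obtain ⟨hxm, hxp⟩ := h x List.mem_cons_self
    have hr := ih (fun y hy => h y (List.mem_cons_of_mem x hy))
    have hrs : 0 ≤ r.sum := List.sum_nonneg (fun y hy => (h y (List.mem_cons_of_mem x hy)).2.le)
    have hs : (x :: r).sum = x + r.sum := by simp
    have hn : (x :: r).sum.toNat = ((x :: r).sum.toNat - 1) + 1 := by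
      rw [hs]; omega
    rw [hn, pvDpM_succ]
    set n := (x :: r).sum.toNat - 1 with hndef
    have hguard : 0 < x ∧ x ≤ ((n + 1 : Nat) : Int) := by
      constructor
      · exact hxp
      · have : ((n + 1 : Nat) : Int) = (x :: r).sum := by rw [hs]; omega
        rw [this, hs]; omega
    have hidx : n + 1 - x.toNat = r.sum.toNat := by rw [hndef]; rw [hs] at *; omega
    have hcand : pvCandG (pvDpM bl) (n + 1) x = pvDpM bl r.sum.toNat := by
      rw [pvCandG, if_pos hguard, hidx]
    cases hfold : (bl.map (pvCandG (pvDpM bl) (n + 1))).foldl pvOmin none with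
    | none =>
      exfalso
      have hall := (pvOmin_foldl_none.mp hfold).2
      have hmem : pvCandG (pvDpM bl) (n + 1) x ∈ bl.map (pvCandG (pvDpM bl) (n + 1)) :=
        List.mem_map_of_mem hxm
      have hzero := hall _ hmem
      have hnone : pvDpM bl r.sum.toNat = none := hcand.symm.trans hzero
      rw [hnone] at hr
      simp at hr
    | some m => simp

theorem pv_recon_eq (bl : List Int) (hpos : ∀ b ∈ bl, 0 < b) (T : Nat)
    (memoF : List (Option (Option Int × Option Int))) (dpF : List (Option Int))
    (hA : ∀ j : Nat, j ≤ T →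
      PySem.List.pyGet? memoF ((j : Nat) : Int) = some (some (pvDpM bl j, pvPtrM bl j)))
    (hB : ∀ j : Nat, j ≤ T → PySem.List.pyGet? dpF ((j : Nat) : Int) = some (pvDpM bl j)) :
    ∀ t : Nat, t ≤ T → (pvDpM bl t).isSome →
      ∀ (counts : List Int) (fa fb : Nat), t < fa → t ≤ fb →
        pvARecon memoF bl fa (t : Int) (pvPtrM bl t) counts
          = pvBRecon dpF bl fb (t : Int) counts := by
  intro t
  induction t using Nat.strong_induction_on with
  | _ t ihstrong =>
    intro htT hsome counts fa fb hfa hfb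
    cases t with
    | zero =>
      have hptr : pvPtrM bl 0 = none := by rw [pvPtrM]; simp
      cases fa with
      | zero => omega
      | succ f =>
        rw [hptr]
        cases fb with
        | zero => rfl
        | succ g => simp [pvARecon, pvBRecon]
    | succ s =>
      obtain ⟨c, hc⟩ : ∃ c, pvDpM bl (s + 1) = some c := by
        cases hx : pvDpM bl (s + 1) with
        | none => rw [hx] at hsome; simp at hsome
        | some c => exact ⟨c, rfl⟩
      have hdp := pvDpM_succ bl s
      rw [hc] at hdp
      obtain ⟨m, hm, hmc⟩ : ∃ m,
          (bl.map (pvCandG (pvDpM bl) (s + 1))).foldl pvOmin none = some m ∧ m + 1 = c := by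
        cases hfold : (bl.map (pvCandG (pvDpM bl) (s + 1))).foldl pvOmin none with
        | none => rw [hfold] at hdp; cases hdp
        | some m =>
          rw [hfold] at hdp
          simp only [Option.map_some, Option.some.injEq] at hdp
          exact ⟨m, rfl, hdp.symm⟩
      have hcm : c - 1 = m := by omega
      obtain ⟨hmem, _⟩ := pvOmin_foldl_spec hm
      have hmem2 : some m ∈ bl.map (pvCandG (pvDpM bl) (s + 1)) := by
        rcases hmem with h | h
        · cases h
        · exact h
      obtain ⟨b0, hb0mem, hb0c⟩ := List.mem_map.mp hmem2
      rw [pvCandG] at hb0c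
      by_cases hg : 0 < b0 ∧ b0 ≤ ((s + 1 : Nat) : Int)
      case neg => rw [if_neg hg] at hb0c; cases hb0c
      rw [if_pos hg] at hb0c
      set ids := PySem.List.pyRange ((bl.length : Int) - 1) (-1) (-1) with hids
      set predP : Int → Bool := (fun idx =>
        match PySem.List.pyGet? bl idx with
        | some b => decide (0 < b) && decide (b ≤ ((s + 1 : Nat) : Int)) &&
            (pvDpM bl ((s + 1) - b.toNat) == some (c - 1))
        | none => false) with hpred
      have hptr : pvPtrM bl (s + 1) = ids.find? predP := by
        rw [pvPtrM, if_neg (by omega), hc]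
      have hex : ∃ x ∈ ids, predP x = true := by
        obtain ⟨j, hjlt, hjb⟩ := List.mem_iff_getElem.mp hb0mem
        refine ⟨(j : Int), ?_, ?_⟩
        · rw [hids, PySem.List.mem_pyRange_neg_one]; omega
        · have hget : PySem.List.pyGet? bl ((j : Nat) : Int) = some bl[j] := by
            rw [PySem.List.pyGet?_natCast, List.getElem?_eq_getElem hjlt]
          rw [hpred]
          simp only [hget, hjb, hcm]
          rw [decide_eq_true hg.1, decide_eq_true hg.2, hb0c]
          simp
      obtain ⟨idx0, hfind⟩ : ∃ i, ids.find? predP = some i := by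
        have h1 := List.find?_isSome.mpr hex
        exact Option.isSome_iff_exists.mp h1
      have hpidx := List.find?_some hfind
      have hmemidx := List.mem_of_find?_eq_some hfind
      have hidxrange : 0 ≤ idx0 ∧ idx0 < (bl.length : Int) := by
        rw [hids] at hmemidx
        rw [PySem.List.mem_pyRange_neg_one] at hmemidx
        omega
      have hblget : PySem.List.pyGet? bl idx0 = some bl[idx0.toNat] :=
        PySem.List.pyGet?_eq_some_getElem bl hidxrange.1 (by omega)
      rw [hpred] at hpidx
      simp only [hblget, Bool.and_eq_true, decide_eq_true_eq, beq_iff_eq] at hpidx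
      obtain ⟨⟨hb1pos, hb1le⟩, hdpeq⟩ := hpidx
      set b1 := bl[idx0.toNat] with hb1
      have hcast2 : ((s + 1 : Nat) : Int) - b1 = ((s + 1 - b1.toNat : Nat) : Int) := by omega
      have htlt : s + 1 - b1.toNat < s + 1 := by omega
      cases fa with
      | zero => omega
      | succ f =>
        cases fb with
        | zero => omega
        | succ g =>
          -- one step of A
          have hreadA : PySem.List.pyGet? memoF (((s + 1 : Nat) : Int) - b1)
              = some (some (pvDpM bl (s + 1 - b1.toNat), pvPtrM bl (s + 1 - b1.toNat))) := by
            rw [hcast2]; exact hA _ (by omega)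
          have hstepA : pvARecon memoF bl (f + 1) ((s + 1 : Nat) : Int)
              (pvPtrM bl (s + 1)) counts
              = pvARecon memoF bl f (((s + 1 : Nat) : Int) - b1)
                  (pvPtrM bl (s + 1 - b1.toNat)) (pvIncr counts idx0) := by
            rw [hptr, hfind, pvARecon]
            simp only [hblget, hreadA]
          -- one step of B
          have hreadB : PySem.List.pyGet? dpF ((s + 1 : Nat) : Int)
              = some (some c) := by
            have := hB (s + 1) htT
            rw [hc] at this
            exact this
          have hcongr : ∀ x ∈ ids, (fun idx =>
              match PySem.List.pyGet? bl idx with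
              | some b => decide (b ≤ ((s + 1 : Nat) : Int)) &&
                  (PySem.List.pyGet? dpF (((s + 1 : Nat) : Int) - b) == some (some (c - 1)))
              | none => false) x = predP x := by
            intro x hx
            rw [hids] at hx
            rw [PySem.List.mem_pyRange_neg_one] at hx
            have hxget : PySem.List.pyGet? bl x = some bl[x.toNat] :=
              PySem.List.pyGet?_eq_some_getElem bl (by omega) (by omega)
            have hxpos : 0 < bl[x.toNat] := hpos _ (List.getElem_mem _)
            rw [hpred]
            simp only [hxget]
            by_cases hxle : bl[x.toNat] ≤ ((s + 1 : Nat) : Int)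
            · have hxc : ((s + 1 : Nat) : Int) - bl[x.toNat]
                  = ((s + 1 - bl[x.toNat].toNat : Nat) : Int) := by omega
              rw [hxc, hB _ (by omega), decide_eq_true hxle, decide_eq_true hxpos]
              simp only [Bool.true_and]
              rfl
            · rw [decide_eq_false hxle]
              simp
          have hstepB : pvBRecon dpF bl (g + 1) ((s + 1 : Nat) : Int) counts
              = pvBRecon dpF bl g (((s + 1 : Nat) : Int) - b1) (pvIncr counts idx0) := by
            rw [pvBRecon]
            rw [if_neg (by push_cast; omega)]
            simp only [hreadB]
            rw [pvFind?_congr hcongr, hfind]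
            simp only [hblget]
          rw [hstepA, hstepB, hcast2]
          exact ihstrong (s + 1 - b1.toNat) htlt (by omega)
            (by rw [hdpeq]; rfl) (pvIncr counts idx0) f g (by omega) (by omega)

-- ===== VERDICT (by name: the statement is the Claim_ definition above) =====
theorem blocks_solver_spec : Claim_equal_blocks_solver := by
  intro blocks tt _hDom hPre
  obtain ⟨hne, hreach⟩ := hPre
  unfold Spec_blocks_solver
  cases blocks with
  | nil => exact absurd rfl hne
  | cons h tl =>
    set f := pvGcdFold h tl with hf
    have hdvd : ∀ b ∈ h :: tl, f ∣ b := by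
      intro b hb
      rcases List.mem_cons.mp hb with rfl | hb
      · exact (pv_gcdFold_dvd tl b).1
      · exact (pv_gcdFold_dvd tl h).2 b hb
    simp only [pvReachChk] at hreach
    by_cases hg0 : f = 0
    · rw [if_pos hg0] at hreach; cases hreach
    rw [if_neg hg0] at hreach
    by_cases hm : PySem.Int.mod tt f ≠ 0
    · rw [if_pos hm] at hreach; cases hreach
    rw [if_neg hm] at hreach
    have hmod0 : PySem.Int.mod tt f = 0 := by
      by_cases hz : PySem.Int.mod tt f = 0
      · exact hz
      · exact absurd hz (by simpa using hm)
    have hdvdtt : f ∣ tt := (PySem.Int.mod_eq_zero_iff_dvd tt f).mp hmod0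
    have hdm : PySem.Int.divmod? tt f = some (PySem.Int.floordiv tt f, PySem.Int.mod tt f) := by
      rw [PySem.Int.divmod?, if_neg hg0]
      rfl
    simp only [blocks_solver, blocks_solver_alt]
    rw [← hf]
    simp only [hdm, hmod0]
    have h00 : ¬((0 : Int) ≠ 0) := by simp
    rw [if_neg h00, if_neg h00]
    set nt := PySem.Int.floordiv tt f with hntdef
    by_cases hdeg : nt = 0 ∨ nt = -1
    · -- degenerate: the tables are just the seed cell and both programs return (0, zeros)
      have hBdeg : ∀ T : Int, T ≤ 0 → pvBfs ((h :: tl).map (fun b => PySem.Int.floordiv b f))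
          T (T.toNat + 2) 0 (some 0 :: List.replicate T.toNat none) [0] = [some 0] := by
        intro T hT
        have hrep : T.toNat = 0 := by omega
        rw [hrep]
        exact pvBfs_deg _ T hT 2 0 [0]
      rcases hdeg with hnt | hnt <;> rw [hnt] <;> rw [hBdeg _ (by norm_num)] <;> rfl
    rw [if_neg hdeg] at hreach
    by_cases hneg2 : nt ≤ -2
    · rw [if_pos hneg2] at hreach; cases hreach
    rw [if_neg hneg2] at hreach
    by_cases hposH : 0 < h ∧ ∀ b ∈ tl, 0 < b
    case neg => rw [if_pos (by simpa using hposH)] at hreach; cases hreach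
    rw [if_neg (by simpa using hposH)] at hreach
    have hpos : ∀ b ∈ h :: tl, 0 < b := by
      intro b hb
      rcases List.mem_cons.mp hb with rfl | hb
      · exact hposH.1
      · exact hposH.2 b hb
    have hfpos : 0 < f := pv_gcdFold_pos tl h (hpos h List.mem_cons_self)
    have hnt1 : 1 ≤ nt := by omega
    set bl := (h :: tl).map (fun b => PySem.Int.floordiv b f) with hbl
    have hqpos : ∀ x ∈ h :: tl, 0 < PySem.Int.floordiv x f := by
      intro x hx
      have h1x : f ≤ x := Int.le_of_dvd (hpos x hx) (hdvd x hx)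
      have h2 := (PySem.Int.le_floordiv_iff_mul_le (a := x) (q := 1) hfpos).mpr
        (by rw [one_mul]; exact h1x)
      omega
    have hblpos : ∀ b ∈ bl, 0 < b := by
      intro b hb
      rw [hbl] at hb
      obtain ⟨x, hx, rfl⟩ := List.mem_map.mp hb
      exact hqpos x hx
    have hrepr : ∃ l : List Int, (∀ x ∈ l, x ∈ bl ∧ 0 < x) ∧ l.sum = (nt.toNat : Int) := by
      by_cases h1 : (1 : Int) ∈ bl
      · refine ⟨List.replicate nt.toNat 1, ?_, ?_⟩
        · intro x hx
          rw [List.eq_of_mem_replicate hx]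
          exact ⟨h1, one_pos⟩
        · simp
      · rw [if_neg h1] at hreach
        by_cases hall : bl.all (fun b => decide (nt < b)) = true
        · rw [if_pos hall] at hreach; cases hreach
        · rw [if_neg hall] at hreach
          exact pv_reach_repr bl nt.toNat hreach
    obtain ⟨l, hl, hsum⟩ := hrepr
    set T := nt.toNat with hTdef
    have hTc : (T : Int) = nt := Int.toNat_of_nonneg (by omega)
    have hdpTsome : (pvDpM bl T).isSome := by
      have hmm := pv_repr_dpM bl l hl
      have hsT : l.sum.toNat = T := by rw [hsum]; omega
      rwa [hsT] at hmm
    obtain ⟨tot, htot⟩ := Option.isSome_iff_exists.mp hdpTsome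
    have hAe := pv_fillA_inv bl hblpos T T le_rfl
    -- the B-side distance table via the BFS invariant
    have hBe := pvBfs_inv bl hblpos T (T + 2) 0
      (some 0 :: List.replicate T none) [0]
      (by simp)
      (by
        intro j hj
        cases j with
        | zero =>
          show some (some 0) = _
          simp [pvDpM, pvCut]
        | succ s =>
          have hsT : s < T := by omega
          show (List.replicate T (none : Option Int))[s]? = _
          rw [List.getElem?_replicate, if_pos hsT]
          cases hdp : pvDpM bl (s + 1) with
          | none => rfl
          | some v =>
            simp only [pvCut, Nat.cast_zero]
            rw [if_neg (by
              intro hcon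
              have hv0 : v = 0 := le_antisymm hcon (pvDpM_nonneg bl (s + 1) v hdp)
              rw [hv0] at hdp
              exact absurd (pvDpM_zero bl (s + 1) hdp) (by omega))])
      (by
        intro x
        constructor
        · intro hx
          have hx0 : x = 0 := by simpa using hx
          subst hx0
          exact ⟨le_refl 0, by omega, by simp [pvDpM]⟩
        · rintro ⟨hx1, hx2, hx3⟩
          have hx0 : x.toNat = 0 := pvDpM_zero bl x.toNat (by
            simpa using hx3)
          have : x = 0 := by omega
          simp [this])
      (by omega)
    rw [← hTc]
    have hgetA : PySem.List.pyGet?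
        (pvAFill bl (some (some 0, none) :: List.replicate T none)
          (PySem.List.pyRange 1 ((T : Int) + 1) 1)) ((T : Nat) : Int)
        = some (some (pvDpM bl T, pvPtrM bl T)) := by
      rw [PySem.List.pyGet?_natCast, hAe T le_rfl, if_pos le_rfl]
    have hgetB : PySem.List.pyGet?
        (pvBfs bl ((T : Nat) : Int) (T + 2) 0 (some 0 :: List.replicate T none) [0])
        ((T : Nat) : Int) = some (pvDpM bl T) := by
      rw [PySem.List.pyGet?_natCast]
      exact hBe T le_rfl
    simp only [hgetA, hgetB, htot]
    have hrecon := pv_recon_eq bl hblpos T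
      (pvAFill bl (some (some 0, none) :: List.replicate T none)
        (PySem.List.pyRange 1 ((T : Int) + 1) 1))
      (pvBfs bl ((T : Nat) : Int) (T + 2) 0 (some 0 :: List.replicate T none) [0])
      (fun j hj => by rw [PySem.List.pyGet?_natCast, hAe j hj, if_pos hj])
      (fun j hj => by rw [PySem.List.pyGet?_natCast]; exact hBe j hj)
      T le_rfl (by rw [htot]; rfl) (List.replicate bl.length 0) (T + 1) T (by omega) le_rfl
    rw [hrecon]
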